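-- pv_equiv track=rewrite | github.com/Prashant7454/L-C2024 | Assignments/Assignment2/CheckArmstrongNumber.py | calculateArmstrongSum
-- ===== SOURCE A (Python) =====
-- def calculateArmstrongSum(numberToCheck):
--     sum = 0
--     totalDigits = 0
--     temporaryNumber = numberToCheck
--     while temporaryNumber > 0:
--         totalDigits += 1
--         temporaryNumber //= 10
--     temporaryNumber = numberToCheck
--
--     while temporaryNumber > 0:
--         currentDigit = temporaryNumber % 10
--         sum += currentDigit ** totalDigits
--         temporaryNumber //= 10
--
--     return sum
-- ===== SOURCE B (Python) =====
-- def calculateArmstrongSum(numberToCheck):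
--     counts = {}
--     k = 0
--     t = numberToCheck
--     while t > 0:
--         d = t % 10
--         counts[d] = counts.get(d, 0) + 1
--         k += 1
--         t //= 10
--     return sum(counts.get(d, 0) * d ** k for d in range(10))
-- ===== Notes on version B (the rewrite author's own statement) =====
-- stated objective: alternative
-- what changed: B replaces A's two digit-walks (count pass, then per-digit exponentiation pass) with a single histogram pass building a digit-frequency counter, and computes the result as a fixed ten-term sum over the digit values, exponentiating once per digit value instead of once per digit occurrence.
import Mathlib
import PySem

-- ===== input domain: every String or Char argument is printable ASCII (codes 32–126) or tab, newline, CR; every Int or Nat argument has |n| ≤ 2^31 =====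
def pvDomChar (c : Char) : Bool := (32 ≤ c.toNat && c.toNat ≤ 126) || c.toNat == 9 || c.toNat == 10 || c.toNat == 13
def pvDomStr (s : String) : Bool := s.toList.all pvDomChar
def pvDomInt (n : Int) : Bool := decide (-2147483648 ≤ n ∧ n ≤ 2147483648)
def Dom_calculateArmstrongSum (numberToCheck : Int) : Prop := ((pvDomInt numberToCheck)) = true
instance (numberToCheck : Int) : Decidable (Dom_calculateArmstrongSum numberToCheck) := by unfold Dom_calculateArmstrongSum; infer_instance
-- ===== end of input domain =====

-- B replaces A's two digit-walks (count pass, then per-digit exponentiation pass) by one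
-- histogram pass building a digit-frequency counter, finishing with a fixed ten-term sum
-- counts[d] * d ** k (objective: alternative algorithm, same asymptotic cost).

theorem pv_floordiv10_toNat_lt (n : Int) (h : 0 < n) :
    (PySem.Int.floordiv n 10).toNat < n.toNat := by
  rw [PySem.Int.floordiv_eq_ediv_of_pos (by norm_num)]
  omega

-- ===== PORT A =====
-- first while loop of A: count the digits
def pvCountA (temporaryNumber : Int) (totalDigits : Nat) : Nat :=
  if temporaryNumber > 0 then
    pvCountA (PySem.Int.floordiv temporaryNumber 10) (totalDigits + 1)
  else totalDigits
termination_by temporaryNumber.toNat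
decreasing_by exact pv_floordiv10_toNat_lt _ (by omega)

-- second while loop of A: accumulate currentDigit ** totalDigits
def pvSumA (temporaryNumber : Int) (totalDigits : Nat) (sum : Int) : Int :=
  if temporaryNumber > 0 then
    pvSumA (PySem.Int.floordiv temporaryNumber 10) totalDigits
      (sum + (PySem.Int.mod temporaryNumber 10) ^ totalDigits)
  else sum
termination_by temporaryNumber.toNat
decreasing_by exact pv_floordiv10_toNat_lt _ (by omega)

def calculateArmstrongSum (numberToCheck : Int) : Int :=
  pvSumA numberToCheck (pvCountA numberToCheck 0) 0

-- ===== PORT B =====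
-- B's single while loop: build the digit-frequency counter and the digit count k
def pvLoopB (t : Int) (counts : PySem.Dict Int Int) (k : Nat) : PySem.Dict Int Int × Nat :=
  if t > 0 then
    -- Python: d = t % 10; counts[d] = counts.get(d, 0) + 1  (d inlined)
    pvLoopB (PySem.Int.floordiv t 10)
      (counts.insert (PySem.Int.mod t 10) (counts.getD (PySem.Int.mod t 10) 0 + 1)) (k + 1)
  else (counts, k)
termination_by t.toNat
decreasing_by exact pv_floordiv10_toNat_lt _ (by omega)

def calculateArmstrongSum_alt (numberToCheck : Int) : Int :=
  let r := pvLoopB numberToCheck PySem.Dict.empty 0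
  ((PySem.List.pyRange 0 10 1).map (fun d => r.1.getD d 0 * d ^ r.2)).sum

-- ===== PRECONDITION & SPEC =====
def Spec_calculateArmstrongSum (numberToCheck : Int) (out : Int) : Prop := out = calculateArmstrongSum_alt numberToCheck
instance (numberToCheck : Int) (out : Int) : Decidable (Spec_calculateArmstrongSum numberToCheck out) := by unfold Spec_calculateArmstrongSum; infer_instance

-- ===== CLAIM (what is proved, stated in full; the proofs are below) =====
def Claim_equal_calculateArmstrongSum : Prop := ∀ (numberToCheck : Int), Dom_calculateArmstrongSum numberToCheck → Spec_calculateArmstrongSum numberToCheck (calculateArmstrongSum numberToCheck)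

-- ===== LEMMAS AND PROOFS =====
-- proof-only helper: the digit list of t (least-significant first)
def pvDigits (t : Int) : List Int :=
  if t > 0 then PySem.Int.mod t 10 :: pvDigits (PySem.Int.floordiv t 10)
  else []
termination_by t.toNat
decreasing_by exact pv_floordiv10_toNat_lt _ (by omega)

theorem pvDigits_mem (t : Int) : ∀ x ∈ pvDigits t, 0 ≤ x ∧ x < 10 := by
  fun_induction pvDigits t with
  | case1 t h ih =>
    intro x hx
    rcases List.mem_cons.1 hx with rfl | hx
    · have := PySem.Int.mod_nonneg t (b := 10) (by norm_num)
      have := PySem.Int.mod_lt t (b := 10) (by norm_num)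
      omega
    · exact ih x hx
  | case2 t h => intro x hx; simp at hx

theorem pvCountA_eq (t : Int) (c : Nat) : pvCountA t c = (pvDigits t).length + c := by
  fun_induction pvCountA t c with
  | case1 t c h ih => rw [ih]; (conv_rhs => rw [pvDigits, if_pos h]); simp only [List.length_cons]; omega
  | case2 t c h => rw [pvDigits, if_neg h]; simp

theorem pvSumA_eq (t : Int) (k : Nat) (s : Int) :
    pvSumA t k s = s + ((pvDigits t).map (fun d => d ^ k)).sum := by
  fun_induction pvSumA t k s with
  | case1 t s h ih => rw [ih]; (conv_rhs => rw [pvDigits, if_pos h]); simp only [List.map_cons, List.sum_cons]; ring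
  | case2 t s h => rw [pvDigits, if_neg h]; simp

theorem pvLoopB_snd (t : Int) (c : PySem.Dict Int Int) (k : Nat) :
    (pvLoopB t c k).2 = (pvDigits t).length + k := by
  fun_induction pvLoopB t c k with
  | case1 t c k h ih => rw [ih]; (conv_rhs => rw [pvDigits, if_pos h]); simp only [List.length_cons]; omega
  | case2 t c k h => rw [pvDigits, if_neg h]; simp

theorem pvLoopB_getD (t : Int) (c : PySem.Dict Int Int) (k : Nat) (d : Int) :
    (pvLoopB t c k).1.getD d 0 = c.getD d 0 + ((pvDigits t).count d : Int) := by
  fun_induction pvLoopB t c k with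
  | case1 t c k h ih =>
    rw [ih]; (conv_rhs => rw [pvDigits, if_pos h])
    by_cases hd : d = PySem.Int.mod t 10
    · simp [hd]; push_cast; ring
    · rw [PySem.Int.mod_eq_emod_of_pos (by norm_num : (0:Int) < 10)] at hd
      simp [Ne.symm hd]
      rw [PySem.Dict.getD_insert, if_neg hd]
  | case2 t c k h => rw [pvDigits, if_neg h]; simp

-- the histogram identity: Σ_{d=0}^{9} count(l,d)·f d = Σ_{x∈l} f x for lists of digits
theorem pv_histogram (l : List Int) (h : ∀ x ∈ l, 0 ≤ x ∧ x < 10) (k : Nat) :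
    ((([0,1,2,3,4,5,6,7,8,9] : List Int)).map (fun d => ((l.count d) : Int) * d ^ k)).sum
      = (l.map (fun d => d ^ k)).sum := by
  induction l with
  | nil => simp
  | cons a l ih =>
    obtain ⟨ha1, ha2⟩ := h a (List.mem_cons_self ..)
    have ih' := ih (fun x hx => h x (List.mem_cons_of_mem _ hx))
    simp only [List.map_cons, List.map_nil, List.sum_cons, List.sum_nil, List.count_cons] at ih' ⊢
    interval_cases a <;> (simp at ih' ⊢; linarith [ih'])

-- ===== VERDICT (by name: the statement is the Claim_ definition above) =====
theorem calculateArmstrongSum_spec : Claim_equal_calculateArmstrongSum := by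
  intro n _
  unfold Spec_calculateArmstrongSum calculateArmstrongSum calculateArmstrongSum_alt
  rw [pvSumA_eq, pvCountA_eq]
  have hrange : PySem.List.pyRange 0 10 1 = ([0,1,2,3,4,5,6,7,8,9] : List Int) := by decide
  simp only [hrange, pvLoopB_getD, pvLoopB_snd, PySem.Dict.getD_empty, zero_add, add_zero]
  rw [pv_histogram _ (pvDigits_mem n)]
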